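-- pv_equiv track=rewrite | github.com/nandorepo/MyFileHelper | modules/message_service.py | resolve_attachments
-- ===== SOURCE A (Python) =====
-- def resolve_attachments(
--     uploaded_files: dict[str, dict], attachment_ids: list[str]
-- ) -> tuple[list[dict] | None, str | None]:
--     attachments: list[dict] = []
--     for file_id in attachment_ids:
--         entry = uploaded_files.get(file_id)
--         if not entry:
--             return None, file_id
--         attachments.append(entry)
--     return attachments, None
-- ===== SOURCE B (Python) =====
-- _SENTINEL = object()
--
--
-- def resolve_attachments(
--     uploaded_files: dict[str, dict], attachment_ids: list[str]
-- ) -> tuple[list[dict] | None, str | None]: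
--     # validate-then-construct: find the first missing/falsy id, else build the list
--     missing = next(
--         (fid for fid in attachment_ids if not uploaded_files.get(fid)), _SENTINEL
--     )
--     if missing is not _SENTINEL:
--         return None, missing
--     return [uploaded_files[fid] for fid in attachment_ids], None
-- ===== Notes on version B (the rewrite author's own statement) =====
-- stated objective: alternative
-- what changed: Replaced the single interleaved check-and-append loop with a validate-then-construct split: one pass finds the first missing/falsy id (unique sentinel, since None/falsy ids are legal), and only if none exists a second pass builds the list.
import Mathlib
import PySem

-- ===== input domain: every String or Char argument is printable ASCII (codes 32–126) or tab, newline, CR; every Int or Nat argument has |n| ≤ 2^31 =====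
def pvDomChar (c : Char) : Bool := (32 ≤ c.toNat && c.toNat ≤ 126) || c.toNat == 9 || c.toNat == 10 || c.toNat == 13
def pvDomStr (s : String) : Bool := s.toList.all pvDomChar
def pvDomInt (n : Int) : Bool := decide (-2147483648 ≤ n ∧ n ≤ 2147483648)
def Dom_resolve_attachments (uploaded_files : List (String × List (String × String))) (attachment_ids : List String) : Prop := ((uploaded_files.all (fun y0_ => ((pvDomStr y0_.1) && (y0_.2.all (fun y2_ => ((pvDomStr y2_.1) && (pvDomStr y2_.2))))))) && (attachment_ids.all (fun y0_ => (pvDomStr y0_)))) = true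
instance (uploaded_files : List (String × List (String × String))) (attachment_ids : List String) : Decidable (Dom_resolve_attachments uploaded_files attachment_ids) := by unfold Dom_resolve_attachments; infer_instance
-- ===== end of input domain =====

-- B replaces A's interleaved check-and-append loop with a validate-then-construct
-- split (find the first missing/falsy id, else map the lookups); same cost, different decomposition.

-- dict.get(k): first match in the association list (shared dict primitive of both ports)
def pvLookup (uploaded_files : List (String × List (String × String))) (fid : String) : Option (List (String × String)) :=
  (uploaded_files.find? (fun p => p.1 == fid)).map (·.2)

-- "if not entry": entry is falsy iff it is None or the empty dict
def pvFalsy (e : Option (List (String × String))) : Bool :=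
  match e with
  | none => true
  | some l => l.isEmpty

-- ===== PORT A =====
-- the for-loop of A, with its accumulator `attachments`
def resolveA_go (uploaded_files : List (String × List (String × String)))
    (attachments : List (List (String × String))) :
    List String → (Option (List (List (String × String)))) × Option String
  | [] => (some attachments, none)
  | fid :: rest =>
    let entry := pvLookup uploaded_files fid
    if pvFalsy entry then (none, some fid)
    else resolveA_go uploaded_files (attachments ++ [entry.getD []]) rest

def resolve_attachments (uploaded_files : List (String × List (String × String))) (attachment_ids : List String) : (Option (List (List (String × String)))) × Option String :=
  resolveA_go uploaded_files [] attachment_ids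

-- ===== PORT B =====
def resolve_attachments_alt (uploaded_files : List (String × List (String × String))) (attachment_ids : List String) : (Option (List (List (String × String)))) × Option String :=
  match attachment_ids.find? (fun fid => pvFalsy (pvLookup uploaded_files fid)) with
  | some fid => (none, fid)   -- missing is not the sentinel
  | none => (some (attachment_ids.map (fun fid => (pvLookup uploaded_files fid).getD [])), none)

-- ===== PRECONDITION & SPEC =====
def Spec_resolve_attachments (uploaded_files : List (String × List (String × String))) (attachment_ids : List String) (out : (Option (List (List (String × String)))) × Option String) : Prop := out = resolve_attachments_alt uploaded_files attachment_ids
instance (uploaded_files : List (String × List (String × String))) (attachment_ids : List String) (out : (Option (List (List (String × String)))) × Option String) : Decidable (Spec_resolve_attachments uploaded_files attachment_ids out) := by unfold Spec_resolve_attachments; infer_instance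

-- ===== CLAIM (what is proved, stated in full; the proofs are below) =====
def Claim_equal_resolve_attachments : Prop := ∀ (uploaded_files : List (String × List (String × String))) (attachment_ids : List String), Dom_resolve_attachments uploaded_files attachment_ids → Spec_resolve_attachments uploaded_files attachment_ids (resolve_attachments uploaded_files attachment_ids)

-- ===== LEMMAS AND PROOFS =====
theorem resolveA_go_eq (uploaded_files : List (String × List (String × String)))
    (acc : List (List (String × String))) (ids : List String) :
    resolveA_go uploaded_files acc ids =
      match ids.find? (fun fid => pvFalsy (pvLookup uploaded_files fid)) with
      | some fid => (none, some fid)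
      | none => (some (acc ++ ids.map (fun fid => (pvLookup uploaded_files fid).getD [])), none) := by
  induction ids generalizing acc with
  | nil => simp [resolveA_go]
  | cons fid rest ih =>
    by_cases h : pvFalsy (pvLookup uploaded_files fid)
    · simp [resolveA_go, List.find?, h]
    · simp [resolveA_go, List.find?, h, ih]

-- ===== VERDICT (by name: the statement is the Claim_ definition above) =====
theorem resolve_attachments_spec : Claim_equal_resolve_attachments := by
  intro uploaded_files attachment_ids _
  show resolve_attachments uploaded_files attachment_ids = resolve_attachments_alt uploaded_files attachment_ids
  simp only [resolve_attachments, resolve_attachments_alt, resolveA_go_eq]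
  cases attachment_ids.find? (fun fid => pvFalsy (pvLookup uploaded_files fid)) <;> simp
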